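-- pv_equiv track=rewrite | github.com/CKPEIIKA/ofti | ofti/foamlib/fallback.py | _collect_paren
-- ===== SOURCE A (Python) =====
-- def _collect_paren(tokens: list[str], index: int) -> tuple[str, int]:
--     depth = 1
--     i = index
--     parts: list[str] = []
--     while i < len(tokens):
--         tok = tokens[i]
--         if tok == "(":
--             depth += 1
--             parts.append(tok)
--             i += 1
--             continue
--         if tok == ")":
--             depth -= 1
--             if depth == 0:
--                 return " ".join(parts).strip(), i + 1
--             parts.append(tok)
--             i += 1
--             continue
--         parts.append(_strip_quotes(tok))
--         i += 1
--     return " ".join(parts).strip(), i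
--
-- def _strip_quotes(token: str) -> str:
--     return token[1:-1] if token.startswith('"') and token.endswith('"') else token
-- ===== SOURCE B (Python) =====
-- def _strip_quotes(token: str) -> str:
--     return token[1:-1] if token.startswith('"') and token.endswith('"') else token
--
-- def _collect_paren(tokens: list[str], index: int) -> tuple[str, int]:
--     # Phase 1: find the index of the matching close paren, tracking only depth.
--     close = None
--     depth = 1
--     for i in range(index, len(tokens)):
--         t = tokens[i]
--         if t == "(":
--             depth += 1
--         elif t == ")":
--             depth -= 1
--             if depth == 0:
--                 close = i
--                 break
--     end = len(tokens) if close is None else close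
--     # Phase 2: one comprehension over the collected span (quotes stripped; parens are unaffected).
--     result = " ".join(_strip_quotes(tokens[j]) for j in range(index, end)).strip()
--     return (result, close + 1) if close is not None else (result, max(index, len(tokens)))
-- ===== Notes on version B (the rewrite author's own statement) =====
-- stated objective: alternative
-- what changed: Replaces the single while-loop that interleaves depth tracking, early return and part accumulation with two phases: a depth-only scan that locates the matching close paren, then one comprehension over the spanned indices joined and stripped.
import Mathlib
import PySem

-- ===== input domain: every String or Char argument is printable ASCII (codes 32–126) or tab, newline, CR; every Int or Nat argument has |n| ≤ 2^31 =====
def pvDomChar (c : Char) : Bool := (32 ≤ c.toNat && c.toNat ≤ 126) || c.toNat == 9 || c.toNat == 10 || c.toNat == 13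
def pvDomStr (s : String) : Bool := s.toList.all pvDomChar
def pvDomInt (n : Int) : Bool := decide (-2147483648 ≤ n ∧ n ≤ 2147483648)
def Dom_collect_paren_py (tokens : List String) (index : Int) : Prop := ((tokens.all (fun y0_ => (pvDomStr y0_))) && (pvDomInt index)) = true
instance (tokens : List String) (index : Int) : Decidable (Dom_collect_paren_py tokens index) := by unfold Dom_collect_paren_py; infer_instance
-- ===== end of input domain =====

-- B splits A's single accumulate-while-scanning loop into a depth-only scan for the matching
-- close paren followed by one map-join over the spanned tokens (alternative decomposition, same cost).


-- ===== PORT A =====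
-- _strip_quotes (shared helper of both Pythons)
def pvStripQuotes (tok : String) : String :=
  if PySem.Str.startswith tok "\"" && PySem.Str.endswith tok "\"" then
    PySem.Str.slice tok (some 1) (some (-1))
  else tok

-- A's while-loop; fuel = number of remaining positions up to len(tokens) (the loop advances i by 1
-- each iteration, so (len - i).toNat iterations suffice). The `none` arm of pyGet? is Python's
-- IndexError, excluded by Pre_.
def pvLoopA (tokens : List String) : Nat → Int → Int → List String → String × Int
  | 0, i, _, parts => (PySem.Str.strip (PySem.Str.join " " parts), i)
  | fuel+1, i, depth, parts =>
    if i < (tokens.length : Int) then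
      match PySem.List.pyGet? tokens i with
      | none => (PySem.Str.strip (PySem.Str.join " " parts), i)
      | some tok =>
        if tok = "(" then pvLoopA tokens fuel (i+1) (depth+1) (parts ++ [tok])
        else if tok = ")" then
          if depth - 1 = 0 then (PySem.Str.strip (PySem.Str.join " " parts), i + 1)
          else pvLoopA tokens fuel (i+1) (depth-1) (parts ++ [tok])
        else pvLoopA tokens fuel (i+1) depth (parts ++ [pvStripQuotes tok])
    else (PySem.Str.strip (PySem.Str.join " " parts), i)

def collect_paren_py (tokens : List String) (index : Int) : String × Int :=
  pvLoopA tokens ((tokens.length : Int) - index).toNat index 1 []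

-- ===== PORT B =====
-- Phase 1 of B: the depth-only for-loop over range(index, len(tokens)) locating the matching ')'.
def pvFindClose (tokens : List String) : Nat → Int → Int → Option Int
  | 0, _, _ => none
  | fuel+1, i, depth =>
    if i < (tokens.length : Int) then
      match PySem.List.pyGet? tokens i with
      | none => none
      | some t =>
        if t = "(" then pvFindClose tokens fuel (i+1) (depth+1)
        else if t = ")" then
          if depth - 1 = 0 then some i else pvFindClose tokens fuel (i+1) (depth-1)
        else pvFindClose tokens fuel (i+1) depth
    else none

def collect_paren_py_alt (tokens : List String) (index : Int) : String × Int :=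
  let close := pvFindClose tokens ((tokens.length : Int) - index).toNat index 1
  let stop : Int := match close with | some c => c | none => (tokens.length : Int)
  let parts := (PySem.List.pyRange index stop 1).map
    (fun j => pvStripQuotes ((PySem.List.pyGet? tokens j).getD ""))
  let res := PySem.Str.strip (PySem.Str.join " " parts)
  match close with
  | some c => (res, c + 1)
  | none => (res, max index (tokens.length : Int))

-- ===== PRECONDITION & SPEC =====
-- Python A raises IndexError exactly when index < -len(tokens) (the first tokens[i] access is then
-- out of range); B raises there too. Pre_ excludes exactly those inputs.
def Pre_collect_paren_py (tokens : List String) (index : Int) : Prop :=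
  -(tokens.length : Int) ≤ index
instance (tokens : List String) (index : Int) : Decidable (Pre_collect_paren_py tokens index) := by
  unfold Pre_collect_paren_py; infer_instance

def pvWitness_collect_paren_py : List String × Int := (["a", "(", "b", ")", ")", "c"], 0)

def Spec_collect_paren_py (tokens : List String) (index : Int) (out : String × Int) : Prop := out = collect_paren_py_alt tokens index
instance (tokens : List String) (index : Int) (out : String × Int) : Decidable (Spec_collect_paren_py tokens index out) := by unfold Spec_collect_paren_py; infer_instance

-- ===== CLAIM (what is proved, stated in full; the proofs are below) =====
def Claim_equal_collect_paren_py : Prop := ∀ (tokens : List String) (index : Int), Dom_collect_paren_py tokens index → Pre_collect_paren_py tokens index → Spec_collect_paren_py tokens index (collect_paren_py tokens index)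

-- ===== LEMMAS AND PROOFS =====

-- body abbreviation used only inside the proofs
def pvG (tokens : List String) (j : Int) : String :=
  pvStripQuotes ((PySem.List.pyGet? tokens j).getD "")

lemma pvFindClose_ge (tokens : List String) :
    ∀ (fuel : Nat) (i depth c : Int), pvFindClose tokens fuel i depth = some c → i ≤ c := by
  intro fuel
  induction fuel with
  | zero => intro i depth c h; simp [pvFindClose] at h
  | succ f ih =>
    intro i depth c h
    unfold pvFindClose at h
    by_cases hi : i < (tokens.length : Int)
    · rw [if_pos hi] at h
      cases hg : PySem.List.pyGet? tokens i with
      | none => rw [hg] at h; simp at h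
      | some t =>
        rw [hg] at h
        simp only at h
        split_ifs at h
        · have := ih _ _ _ h; omega
        · simp at h; omega
        · have := ih _ _ _ h; omega
        · have := ih _ _ _ h; omega
    · rw [if_neg hi] at h; simp at h

lemma pvStrip_paren_open : pvStripQuotes "(" = "(" := by decide
lemma pvStrip_paren_close : pvStripQuotes ")" = ")" := by decide

lemma pvMain (tokens : List String) :
    ∀ (fuel : Nat) (i depth : Int) (parts : List String),
      -(tokens.length : Int) ≤ i → (tokens.length : Int) ≤ i + fuel →
      pvLoopA tokens fuel i depth parts =
        match pvFindClose tokens fuel i depth with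
        | some c => (PySem.Str.strip (PySem.Str.join " "
            (parts ++ (PySem.List.pyRange i c 1).map (pvG tokens))), c + 1)
        | none => (PySem.Str.strip (PySem.Str.join " "
            (parts ++ (PySem.List.pyRange i (tokens.length : Int) 1).map (pvG tokens))),
            max i (tokens.length : Int)) := by
  intro fuel
  induction fuel with
  | zero =>
    intro i depth parts hlo hhi
    have hge : (tokens.length : Int) ≤ i := by omega
    have hr : PySem.List.pyRange i (tokens.length : Int) 1 = [] := by
      rw [PySem.List.pyRange_one]
      have : ((tokens.length : Int) - i).toNat = 0 := by omega
      simp [this]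
    simp [pvLoopA, pvFindClose, hr]
    omega
  | succ f ih =>
    intro i depth parts hlo hhi
    by_cases hi : i < (tokens.length : Int)
    · have hg : ∃ t, PySem.List.pyGet? tokens i = some t := by
        cases hg' : PySem.List.pyGet? tokens i with
        | none =>
          rw [PySem.List.pyGet?_eq_none_iff] at hg'
          exact absurd (by exact ⟨hlo, hi⟩) hg'
        | some t => exact ⟨t, rfl⟩
      obtain ⟨tok, htok⟩ := hg
      have hgi : pvG tokens i = pvStripQuotes tok := by simp [pvG, htok]
      have hcons : ∀ c : Int, i < c →
          PySem.List.pyRange i c 1 = i :: PySem.List.pyRange (i+1) c 1 :=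
        fun c hc => PySem.List.pyRange_one_cons hc
      unfold pvLoopA pvFindClose
      rw [if_pos hi, if_pos hi, htok]
      simp only
      by_cases h1 : tok = "("
      · rw [if_pos h1, if_pos h1]
        rw [ih (i+1) (depth+1) (parts ++ [tok]) (by omega) (by omega)]
        cases hc : pvFindClose tokens f (i+1) (depth+1) with
        | some c =>
          have hic : i < c := by have := pvFindClose_ge tokens f (i+1) (depth+1) c hc; omega
          simp only
          rw [hcons c hic]
          simp [hgi, h1, pvStrip_paren_open]
        | none =>
          simp only
          rw [hcons (tokens.length : Int) hi]
          simp [hgi, h1, pvStrip_paren_open]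
          omega
      · rw [if_neg h1, if_neg h1]
        by_cases h2 : tok = ")"
        · rw [if_pos h2, if_pos h2]
          by_cases h3 : depth - 1 = 0
          · rw [if_pos h3, if_pos h3]
            have hr : PySem.List.pyRange i i 1 = [] := by
              rw [PySem.List.pyRange_one]; simp
            simp [hr]
          · rw [if_neg h3, if_neg h3]
            rw [ih (i+1) (depth-1) (parts ++ [tok]) (by omega) (by omega)]
            cases hc : pvFindClose tokens f (i+1) (depth-1) with
            | some c =>
              have hic : i < c := by have := pvFindClose_ge tokens f (i+1) (depth-1) c hc; omega
              simp only
              rw [hcons c hic]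
              simp [hgi, h2, pvStrip_paren_close]
            | none =>
              simp only
              rw [hcons (tokens.length : Int) hi]
              simp [hgi, h2, pvStrip_paren_close]
              omega
        · rw [if_neg h2, if_neg h2]
          rw [ih (i+1) depth (parts ++ [pvStripQuotes tok]) (by omega) (by omega)]
          cases hc : pvFindClose tokens f (i+1) depth with
          | some c =>
            have hic : i < c := by have := pvFindClose_ge tokens f (i+1) depth c hc; omega
            simp only
            rw [hcons c hic]
            simp [hgi]
          | none =>
            simp only
            rw [hcons (tokens.length : Int) hi]
            simp [hgi]
            omega
    · have hr : PySem.List.pyRange i (tokens.length : Int) 1 = [] := by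
        rw [PySem.List.pyRange_one]
        have : ((tokens.length : Int) - i).toNat = 0 := by omega
        simp [this]
      simp [pvLoopA, pvFindClose, hi, hr]
      omega

-- ===== VERDICT (by name: the statement is the Claim_ definition above) =====
theorem collect_paren_py_spec : Claim_equal_collect_paren_py := by
  intro tokens index _hdom hpre
  unfold Spec_collect_paren_py collect_paren_py collect_paren_py_alt
  have hfuel : (tokens.length : Int) ≤ index + ((tokens.length : Int) - index).toNat := by omega
  rw [pvMain tokens ((tokens.length : Int) - index).toNat index 1 [] hpre hfuel]
  cases hc : pvFindClose tokens ((tokens.length : Int) - index).toNat index 1 with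
  | some c => rfl
  | none => rfl
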